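-- pv_equiv track=rewrite | github.com/FrancoCirielli16/Python-Practica2 | Ejercicio-8.py | es_heterograma
-- ===== SOURCE A (Python) =====
-- def es_heterograma(palabra_o_frase):
--
--     letras_vistas = set()
--     for letra in palabra_o_frase:
--         if letra.isalpha():
--             if letra.lower() in letras_vistas:
--                 return False
--             else:
--                 letras_vistas.add(letra.lower())
--     return True
-- ===== SOURCE B (Python) =====
-- def es_heterograma(palabra_o_frase):
--     letras = sorted(c.lower() for c in palabra_o_frase if c.isalpha())
--     return all(a != b for a, b in zip(letras, letras[1:]))
-- ===== Notes on version B (the rewrite author's own statement) =====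
-- stated objective: alternative
-- what changed: Replaces A's single-pass seen-set scan with early return by a sort-then-adjacent-scan: sort the lowercased letters and check that no two neighbours are equal (correct because duplicates of a sorted list are adjacent).
import Mathlib
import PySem

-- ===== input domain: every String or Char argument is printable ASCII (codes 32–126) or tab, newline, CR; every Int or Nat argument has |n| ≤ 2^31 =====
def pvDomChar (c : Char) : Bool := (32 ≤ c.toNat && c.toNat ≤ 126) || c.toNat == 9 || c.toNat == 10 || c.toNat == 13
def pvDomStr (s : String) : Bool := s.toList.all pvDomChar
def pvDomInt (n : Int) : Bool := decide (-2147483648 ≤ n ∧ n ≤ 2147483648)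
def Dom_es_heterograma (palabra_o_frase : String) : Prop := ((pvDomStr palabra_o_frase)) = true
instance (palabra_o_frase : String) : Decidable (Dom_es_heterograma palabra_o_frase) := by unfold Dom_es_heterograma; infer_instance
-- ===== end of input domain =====

-- B replaces A's single-pass seen-set scan (with early return False) by a different
-- algorithm: sort the lowercased letters and check no two adjacent ones are equal.

-- ===== PORT A =====
-- the for-loop of A: scan the characters carrying the set of lowered letters seen so far
def pvScanA : List Char → PySem.Set Char → Bool
  | [], _ => true
  | letra :: rest, letras_vistas =>
    if PySem.Chars.isalpha letra then
      if PySem.Set.contains letras_vistas (PySem.Chars.lowerChar letra) then false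
      else pvScanA rest (PySem.Set.add letras_vistas (PySem.Chars.lowerChar letra))
    else pvScanA rest letras_vistas

def es_heterograma (palabra_o_frase : String) : Bool :=
  pvScanA palabra_o_frase.toList PySem.Set.empty

-- ===== PORT B =====
def es_heterograma_alt (palabra_o_frase : String) : Bool :=
  let letras := PySem.List.sorted
      ((palabra_o_frase.toList.filter PySem.Chars.isalpha).map PySem.Chars.lowerChar)
      (fun c => c) false
  -- all(a != b for a, b in zip(letras, letras[1:]))
  (letras.zip (letras.drop 1)).all (fun p => p.1 != p.2)

-- ===== PRECONDITION & SPEC =====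
def Spec_es_heterograma (palabra_o_frase : String) (out : Bool) : Prop := out = es_heterograma_alt palabra_o_frase
instance (palabra_o_frase : String) (out : Bool) : Decidable (Spec_es_heterograma palabra_o_frase out) := by unfold Spec_es_heterograma; infer_instance

-- ===== CLAIM =====
def Claim_equal_es_heterograma : Prop := ∀ (palabra_o_frase : String), Dom_es_heterograma palabra_o_frase → Spec_es_heterograma palabra_o_frase (es_heterograma palabra_o_frase)

-- ===== LEMMAS AND PROOFS =====

-- A's scan restricted to the already-filtered, already-lowered letter stream
def pvScanG : List Char → PySem.Set Char → Bool
  | [], _ => true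
  | x :: xs, seen =>
    if PySem.Set.contains seen x then false
    else pvScanG xs (PySem.Set.add seen x)

lemma pvScanA_eq_scanG (cs : List Char) (seen : PySem.Set Char) :
    pvScanA cs seen = pvScanG ((cs.filter PySem.Chars.isalpha).map PySem.Chars.lowerChar) seen := by
  induction cs generalizing seen with
  | nil => rfl
  | cons c cs ih =>
    by_cases h : PySem.Chars.isalpha c
    · simp [pvScanA, h, pvScanG, ih]
    · simp [pvScanA, h, ih]

lemma pvScanG_iff (xs : List Char) (seen : PySem.Set Char) :
    pvScanG xs seen = true ↔ xs.Nodup ∧ ∀ x ∈ xs, x ∉ seen := by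
  induction xs generalizing seen with
  | nil => simp [pvScanG]
  | cons x xs ih =>
    rw [pvScanG]
    by_cases h : PySem.Set.contains seen x = true
    · have hx : x ∈ seen := by simpa [PySem.Set.contains] using h
      simp only [h, if_true]
      constructor
      · intro hf; cases hf
      · rintro ⟨-, hmem⟩; exact absurd hx (hmem x (by simp))
    · have hx : x ∉ seen := by simpa [PySem.Set.contains] using h
      have hadd : PySem.Set.add seen x = seen ++ [x] := by
        simp only [PySem.Set.add, h, Bool.false_eq_true, if_false]
      rw [if_neg h, ih, hadd, List.nodup_cons]
      constructor
      · rintro ⟨hnd, hmem⟩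
        refine ⟨⟨fun hxm => (hmem x hxm) (by simp), hnd⟩, fun y hy hys => ?_⟩
        rcases List.mem_cons.mp hy with rfl | hyxs
        · exact hx hys
        · exact (hmem y hyxs) (by simp [hys])
      · rintro ⟨⟨hxxs, hnd⟩, hmem⟩
        refine ⟨hnd, fun y hy => ?_⟩
        simp only [List.mem_append, List.mem_singleton]
        rintro (hys | rfl)
        · exact hmem y (by simp [hy]) hys
        · exact hxxs hy

lemma all_zip_isChain (ys : List Char) :
    ((ys.zip (ys.drop 1)).all (fun p => p.1 != p.2)) = true ↔ ys.IsChain (· ≠ ·) := by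
  induction ys with
  | nil => simp
  | cons a tail ih =>
    cases tail with
    | nil => simp
    | cons b ys =>
      rw [List.isChain_cons_cons, ← ih]
      simp

lemma isChain_lt_of_le_ne (ys : List Char) (h1 : ys.IsChain (· ≤ ·)) (h2 : ys.IsChain (· ≠ ·)) :
    ys.IsChain (· < ·) := by
  induction ys with
  | nil => exact .nil
  | cons a tail ih =>
    cases tail with
    | nil => exact .singleton a
    | cons b ys =>
      rw [List.isChain_cons_cons] at *
      exact ⟨lt_of_le_of_ne h1.1 h2.1, ih h1.2 h2.2⟩

lemma isChain_ne_iff_nodup (ys : List Char) (hle : ys.Pairwise (· ≤ ·)) :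
    ys.IsChain (· ≠ ·) ↔ ys.Nodup := by
  constructor
  · intro h
    have hlt : ys.IsChain (· < ·) := isChain_lt_of_le_ne ys hle.isChain h
    exact (List.isChain_iff_pairwise.mp hlt).imp ne_of_lt
  · intro h
    exact List.Pairwise.isChain h

-- ===== VERDICT =====
theorem es_heterograma_spec : Claim_equal_es_heterograma := by
  intro s _
  unfold Spec_es_heterograma es_heterograma es_heterograma_alt
  set l := (s.toList.filter PySem.Chars.isalpha).map PySem.Chars.lowerChar with hl
  set ys := PySem.List.sorted l (fun c => c) false with hys
  have hperm : ys.Perm l := PySem.List.sorted_perm l _ _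
  have hpw : ys.Pairwise (· ≤ ·) := by
    have := PySem.List.sorted_pairwise (xs := l) (key := fun c => c)
    simpa using this
  have hA : pvScanA s.toList PySem.Set.empty = true ↔ l.Nodup := by
    rw [pvScanA_eq_scanG, ← hl, pvScanG_iff]
    simp [PySem.Set.empty]
  have hB : ((ys.zip (ys.drop 1)).all (fun p => p.1 != p.2)) = true ↔ l.Nodup := by
    rw [all_zip_isChain, isChain_ne_iff_nodup ys hpw]
    exact hperm.nodup_iff
  rw [Bool.eq_iff_iff, hA, hB]
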